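-- pv_equiv track=rewrite | github.com/skreimeyer/rsliberate | rsliberate/e0449.py | make_file_stack
-- ===== SOURCE A (Python) =====
-- from typing import TextIO, List, Tuple
--
-- def make_file_stack(pstack: List[Tuple[str,int]]) -> List[Tuple[str,int]]:
--     """
--     takes a job stack for the entire project and pops off elements into a new
--     stack which represents errors  in just one file.
--
--     Modifies input stack
--     """
--     fstack = []
--     first = pstack.pop()
--     filename = first[0]
--     fstack.append(first)
--     while len(pstack) > 0 and pstack[-1][0] == filename:
--         fstack.append(pstack.pop())
--     return fstack
-- ===== SOURCE B (Python) =====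
-- from typing import List, Tuple
--
-- def make_file_stack(pstack: List[Tuple[str, int]]) -> List[Tuple[str, int]]:
--     """Count the trailing run sharing the last entry's filename, then build the
--     result by one reversed slice and delete the run in place (same mutation as A)."""
--     filename = pstack[-1][0]
--     count = 0
--     while count < len(pstack) and pstack[-1 - count][0] == filename:
--         count += 1
--     fstack = list(reversed(pstack[-count:]))
--     del pstack[-count:]
--     return fstack
-- ===== Notes on version B (the rewrite author's own statement) =====
-- stated objective: simpler
-- what changed: A pops elements one at a time into a growing fstack inside the while loop; B only counts the length of the trailing run with matching filename and then produces the result as a single reversed slice (and one in-place slice deletion), so no intermediate list is built element by element.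
-- outside the precondition, e.g. on make_file_stack([]): A raises IndexError, B raises IndexError
import Mathlib
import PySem

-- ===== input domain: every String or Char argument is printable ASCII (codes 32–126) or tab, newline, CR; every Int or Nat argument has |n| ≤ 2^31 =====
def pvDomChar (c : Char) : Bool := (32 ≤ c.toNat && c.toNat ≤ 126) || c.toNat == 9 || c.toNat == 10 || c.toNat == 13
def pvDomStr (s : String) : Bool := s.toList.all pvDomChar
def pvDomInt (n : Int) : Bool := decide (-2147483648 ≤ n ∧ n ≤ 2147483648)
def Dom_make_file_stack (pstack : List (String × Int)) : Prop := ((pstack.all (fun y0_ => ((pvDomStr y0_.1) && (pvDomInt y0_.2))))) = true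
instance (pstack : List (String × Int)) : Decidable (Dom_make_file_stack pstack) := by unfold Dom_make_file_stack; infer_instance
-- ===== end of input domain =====

-- B replaces A's pop-one-at-a-time loop by counting the trailing run and taking one
-- reversed slice (objective: simpler decomposition; no speed claim). Both Pythons
-- mutate the input identically; the theorems are about the return value.

-- ===== PORT A =====
-- while len(pstack) > 0 and pstack[-1][0] == filename: fstack.append(pstack.pop())
def mfsLoopA (filename : String) (pstack fstack : List (String × Int)) :
    List (String × Int) :=
  match h : PySem.List.pop? pstack (-1) with  -- h feeds decreasing_by
  | some (top, rest) =>
      if top.1 == filename then mfsLoopA filename rest (fstack ++ [top]) else fstack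
  | none => fstack
termination_by pstack.length
decreasing_by
  have h2 := PySem.List.length_of_pop?_eq_some pstack h
  simp at h2
  omega

def make_file_stack (pstack : List (String × Int)) : List (String × Int) :=
  match PySem.List.pop? pstack (-1) with
  | none => []  -- Python raises IndexError on the empty list; excluded by Pre_
  | some (first, rest) => mfsLoopA first.1 rest ([] ++ [first])

-- ===== PORT B =====
-- while count < len(pstack) and pstack[-1 - count][0] == filename: count += 1
def mfsCount (filename : String) (pstack : List (String × Int)) (count : Nat) : Nat :=
  if h : count < pstack.length ∧
      (PySem.List.pyGetD pstack (-1 - (count : Int)) ("", 0)).1 == filename then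
    mfsCount filename pstack (count + 1)
  else count
termination_by pstack.length - count

def make_file_stack_alt (pstack : List (String × Int)) : List (String × Int) :=
  match PySem.List.pyGet? pstack (-1) with
  | none => []  -- Python raises IndexError on the empty list; excluded by Pre_
  | some first =>
      let count := mfsCount first.1 pstack 0
      (PySem.List.slice pstack (some (-(count : Int))) none).reverse

-- ===== PRECONDITION & SPEC =====
-- Both Pythons raise IndexError on the empty list; Pre_ excludes exactly that input.
def Pre_make_file_stack (pstack : List (String × Int)) : Prop := pstack ≠ []
instance (pstack : List (String × Int)) : Decidable (Pre_make_file_stack pstack) := by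
  unfold Pre_make_file_stack; infer_instance

def pvWitness_make_file_stack : (List (String × Int)) := [("a", 1), ("b", 2), ("b", 3)]

def Spec_make_file_stack (pstack : List (String × Int)) (out : List (String × Int)) : Prop :=
  out = make_file_stack_alt pstack
instance (pstack : List (String × Int)) (out : List (String × Int)) :
    Decidable (Spec_make_file_stack pstack out) := by unfold Spec_make_file_stack; infer_instance

-- ===== CLAIM (what is proved, stated in full; the proofs are below) =====
def Claim_equal_make_file_stack : Prop :=
  ∀ (pstack : List (String × Int)), Dom_make_file_stack pstack →
    Pre_make_file_stack pstack → Spec_make_file_stack pstack (make_file_stack pstack)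

-- ===== LEMMAS AND PROOFS =====

-- A's loop appends exactly the matching prefix of the reversed remaining stack.
theorem mfsLoopA_eq (filename : String) (pstack fstack : List (String × Int)) :
    mfsLoopA filename pstack fstack =
      fstack ++ pstack.reverse.takeWhile (fun p => p.1 == filename) := by
  induction pstack using List.reverseRecOn generalizing fstack with
  | nil =>
      rw [mfsLoopA.eq_def]
      simp only [List.reverse_nil, List.takeWhile_nil, List.append_nil]
      rfl
  | append_singleton xs x ih =>
      rw [mfsLoopA.eq_def, PySem.List.pop?_last]
      by_cases hx : x.1 == filename
      · simp only [hx, if_pos, List.reverse_append, List.reverse_cons, List.reverse_nil,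
          List.nil_append, List.singleton_append, List.takeWhile_cons, ih]
        simp
      · simp [hx]

-- B's counter counts, past `count`, the matching prefix of the reversed stack.
theorem mfsCount_eq (filename : String) (pstack : List (String × Int)) (count : Nat)
    (hc : count ≤ pstack.length) :
    mfsCount filename pstack count =
      count + ((pstack.reverse.drop count).takeWhile (fun p => p.1 == filename)).length := by
  induction hn : pstack.length - count generalizing count with
  | zero =>
      have hcl : count = pstack.length := by omega
      rw [mfsCount]
      simp [hcl]
  | succ n ih =>
      have hlt : count < pstack.length := by omega
      have hrl : count < pstack.reverse.length := by simpa using hlt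
      have hidx : PySem.List.pyGetD pstack (-1 - (count : Int)) ("", 0) =
          pstack.reverse[count]'hrl := by
        have h1 : (-1 - (count : Int)) = -((count + 1 : Nat) : Int) := by push_cast; ring
        rw [h1, PySem.List.pyGetD_neg_natCast _ _ _ (by omega) (by omega)]
        rw [List.getElem_reverse]
        congr 1
        omega
      have hdrop : pstack.reverse.drop count =
          pstack.reverse[count]'hrl :: pstack.reverse.drop (count + 1) :=
        List.drop_eq_getElem_cons hrl
      rw [mfsCount]
      by_cases hm : (pstack.reverse[count]'hrl).1 == filename
      · rw [dif_pos ⟨hlt, by rw [hidx]; exact hm⟩, ih (count + 1) (by omega) (by omega)]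
        rw [hdrop, List.takeWhile_cons, if_pos hm]
        simp
        omega
      · rw [dif_neg (fun hab => hm (hidx ▸ hab.2))]
        rw [hdrop, List.takeWhile_cons, if_neg hm]
        simp

-- takeWhile is the take of its own length.
theorem takeWhile_eq_take_length {α : Type} (p : α → Bool) (l : List α) :
    l.takeWhile p = l.take (l.takeWhile p).length := by
  induction l with
  | nil => simp
  | cons x xs ih =>
      by_cases hx : p x
      · simp [hx]; exact ih
      · simp [hx]

-- ===== VERDICT (by name: the statement is the Claim_ definition above) =====
theorem make_file_stack_spec : Claim_equal_make_file_stack := by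
  intro pstack _ hpre
  unfold Spec_make_file_stack make_file_stack make_file_stack_alt
  rcases List.eq_nil_or_concat pstack with rfl | ⟨xs, x, rfl⟩
  · exact absurd rfl hpre
  rw [List.concat_eq_append, PySem.List.pop?_last, PySem.List.pyGet?_neg_one_append_singleton]
  simp only
  rw [mfsLoopA_eq]
  set p : String × Int → Bool := fun q => q.1 == x.1 with hp
  have hcount : mfsCount x.1 (xs ++ [x]) 0 = ((xs ++ [x]).reverse.takeWhile p).length := by
    rw [mfsCount_eq _ _ 0 (by omega)]
    simp [hp]
  rw [hcount]
  have hrev : (xs ++ [x]).reverse = x :: xs.reverse := by simp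
  have hrun1 : 0 < ((xs ++ [x]).reverse.takeWhile p).length := by
    rw [hrev, List.takeWhile_cons]
    simp [hp]
  set k : Nat := ((xs ++ [x]).reverse.takeWhile p).length with hk
  have hkle : k ≤ (xs ++ [x]).length := by
    rw [hk, hrev]
    have h1 := (List.takeWhile_sublist p (l := x :: xs.reverse)).length_le
    simp at h1 ⊢
    omega
  rw [PySem.List.slice_from_neg_natCast _ _ hrun1]
  have htake : (xs ++ [x]).reverse.takeWhile p = (xs ++ [x]).reverse.take k :=
    takeWhile_eq_take_length p _
  have hdrop : ((xs ++ [x]).drop ((xs ++ [x]).length - k)).reverse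
      = (xs ++ [x]).reverse.take k := by
    rw [List.reverse_drop]
    congr 1
    omega
  rw [hdrop, ← htake, hrev, List.takeWhile_cons]
  simp [hp]
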